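-- pv_equiv track=rewrite | github.com/DoraLC/projecteuler | problem28_NumberSpiralDiagonals.py | diaSeq
-- ===== SOURCE A (Python) =====
-- def diaSeq(size):
--     rtn = []
--     for i in range(1, size + 1, 2):
--         if i == 1:
--             rtn.append([i])
--         else:
--             rtn.append([i**2, i**2 - (i - 1), i**2 - 2* (i - 1), i**2 - 3 * (i - 1)])
--     return rtn
-- ===== SOURCE B (Python) =====
-- def diaSeq(size):
--     # Thread a running max-corner accumulator across rings instead of the
--     # per-ring closed form i**2 - k*(i-1).
--     rings = (size + 1) // 2
--     rtn = []
--     n = 1       # max corner of the previous ring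
--     step = 0    # gap between corners on the current ring
--     for r in range(rings):
--         if r == 0:
--             rtn.append([1])
--         else:
--             step += 2
--             asc = []
--             c = n
--             for _ in range(4):
--                 c += step
--                 asc.append(c)
--             rtn.append(asc[::-1])
--             n = asc[-1]
--     return rtn
-- ===== Notes on version B (the rewrite author's own statement) =====
-- stated objective: alternative
-- what changed: B counts the rings with floor division and threads a running accumulator (the previous ring's max corner and an incrementally grown corner gap) through the loop, building each ring's corners by repeated addition and a reversal, instead of A's per-odd-i closed form.
import Mathlib
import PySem

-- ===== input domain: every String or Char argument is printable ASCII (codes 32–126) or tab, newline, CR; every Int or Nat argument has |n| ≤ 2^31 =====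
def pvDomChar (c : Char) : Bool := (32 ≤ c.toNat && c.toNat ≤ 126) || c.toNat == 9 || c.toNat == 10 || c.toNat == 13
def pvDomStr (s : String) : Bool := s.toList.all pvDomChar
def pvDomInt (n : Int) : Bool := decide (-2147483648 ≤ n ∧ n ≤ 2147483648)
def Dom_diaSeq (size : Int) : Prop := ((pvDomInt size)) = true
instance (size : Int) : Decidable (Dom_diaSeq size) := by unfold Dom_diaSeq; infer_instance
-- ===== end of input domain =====

-- B threads a running max-corner accumulator and a growing step across rings
-- (repeated addition + reversal) instead of A's closed form i^2 - k*(i-1); objective: alternative.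


-- ===== PORT A =====
def diaSeq (size : Int) : List (List Int) :=
  (PySem.List.pyRange 1 (size + 1) 2).foldl
    (fun rtn i =>
      if i = 1 then rtn ++ [[i]]
      else rtn ++ [[i ^ 2, i ^ 2 - (i - 1), i ^ 2 - 2 * (i - 1), i ^ 2 - 3 * (i - 1)]])
    []

-- ===== PORT B =====
-- one iteration of Source B's ring loop; state = (rtn, n, step)
def diaSeqAltRing (st : List (List Int) × Int × Int) (r : Int) : List (List Int) × Int × Int :=
  if r = 0 then (st.1 ++ [[1]], st.2.1, st.2.2)
  else
    let step := st.2.2 + 2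
    -- inner 'for _ in range(4): c += step; asc.append(c)' as a fold over (c, asc)
    let p := (PySem.List.pyRange 0 4 1).foldl
      (fun (q : Int × List Int) _ => (q.1 + step, q.2 ++ [q.1 + step])) (st.2.1, [])
    (st.1 ++ [p.2.reverse], PySem.List.pyGetD p.2 (-1) 0, step)

def diaSeq_alt (size : Int) : List (List Int) :=
  ((PySem.List.pyRange 0 (PySem.Int.floordiv (size + 1) 2) 1).foldl diaSeqAltRing ([], 1, 0)).1

-- ===== PRECONDITION & SPEC =====
def Spec_diaSeq (size : Int) (out : List (List Int)) : Prop := out = diaSeq_alt size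
instance (size : Int) (out : List (List Int)) : Decidable (Spec_diaSeq size out) := by unfold Spec_diaSeq; infer_instance

-- ===== CLAIM (what is proved, stated in full; the proofs are below) =====
def Claim_equal_diaSeq : Prop := ∀ (size : Int), Dom_diaSeq size → Spec_diaSeq size (diaSeq size)

-- ===== LEMMAS AND PROOFS =====

-- the k-th ring as both programs produce it
def pvRing (k : Nat) : List Int :=
  if k = 0 then [1]
  else
    let i : Int := 2 * k + 1
    [i ^ 2, i ^ 2 - (i - 1), i ^ 2 - 2 * (i - 1), i ^ 2 - 3 * (i - 1)]

-- A's loop body is an append of a single ring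
def pvGA (i : Int) : List Int :=
  if i = 1 then [i] else [i ^ 2, i ^ 2 - (i - 1), i ^ 2 - 2 * (i - 1), i ^ 2 - 3 * (i - 1)]

lemma pvGA_odd (k : Nat) : pvGA (1 + 2 * (k : Int)) = pvRing k := by
  cases k with
  | zero => decide
  | succ n =>
    have h1 : (1 + 2 * ((n + 1 : Nat) : Int)) ≠ 1 := by push_cast; omega
    simp only [pvGA, pvRing, if_neg h1]
    push_cast
    ring_nf

lemma pvA_eq (m : Nat) :
    (List.range m).foldl (fun rtn (k : Nat) => rtn ++ [pvGA (1 + 2 * (k : Int))]) [] =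
    (List.range m).map pvRing := by
  refine (PySem.List.foldl_append_singleton_eq_map
      (fun k : Nat => pvGA (1 + 2 * (k : Int))) (List.range m) []).trans ?_
  rw [List.nil_append]
  exact List.map_congr_left (fun k _ => pvGA_odd k)

-- B's loop invariant: output so far, the running max corner and step after m rings
lemma pvB_fold (m : Nat) :
    (List.range m).foldl (fun st (k : Nat) => diaSeqAltRing st (k : Int)) ([], 1, 0) =
    ((List.range m).map pvRing, (2 * (m : Int) - 1) ^ 2,
      if m = 0 then 0 else 2 * ((m : Int) - 1)) := by
  induction m with
  | zero => decide
  | succ n ih =>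
    rw [List.range_succ, List.foldl_append, ih]
    cases n with
    | zero => decide
    | succ j =>
      have hr : PySem.List.pyRange 0 4 1 = [0, 1, 2, 3] := by decide
      have hne : ((j + 1 : Nat) : Int) ≠ 0 := by push_cast; omega
      simp only [List.foldl_cons, List.foldl_nil, diaSeqAltRing, if_neg hne, hr,
        List.range_succ, List.map_append, List.map_cons,
        List.map_nil, PySem.List.pyGetD, Prod.mk.injEq]
      refine ⟨?_, ?_, ?_⟩
      · simp only [pvRing, Nat.succ_ne_zero, List.reverse]
        push_cast
        simp only [List.nil_append, List.cons_append, List.append_assoc]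
        norm_num
        constructor <;> [ring_nf; (constructor <;> [ring_nf; (constructor <;> ring_nf)])]
      · norm_num [PySem.List.pyGetD, PySem.List.pyIdx?]
        ring_nf
        norm_num [PySem.List.pyGet?, PySem.List.pyIdx?]
      · push_cast; ring_nf

lemma pvRings_count (size : Int) (_h : 1 ≤ size) :
    PySem.Int.floordiv (size + 1) 2 = (size + 1) / 2 :=
  PySem.Int.floordiv_eq_ediv_of_pos (by omega)

-- ===== VERDICT (by name: the statement is the Claim_ definition above) =====
theorem diaSeq_spec : Claim_equal_diaSeq := by
  intro size _
  unfold Spec_diaSeq diaSeq diaSeq_alt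
  by_cases hs : 1 ≤ size
  · -- both loops run M = (size+1)/2 rings
    rw [PySem.List.pyRange_of_pos 1 (size + 1) (by norm_num),
        pvRings_count size hs, PySem.List.pyRange_one]
    have hM : ((size + 1 - 1 + 2 - 1) / 2).toNat = ((size + 1) / 2 - 0).toNat := by omega
    rw [if_pos (by omega), hM, List.foldl_map, List.foldl_map]
    have hb : ∀ (rtn : List (List Int)) (k : Nat),
        (if (1 + 2 * (k : Int)) = 1 then rtn ++ [1 + 2 * (k : Int)] :: []
         else rtn ++ [(1 + 2 * (k : Int)) ^ 2, (1 + 2 * (k : Int)) ^ 2 - (1 + 2 * (k : Int) - 1),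
            (1 + 2 * (k : Int)) ^ 2 - 2 * (1 + 2 * (k : Int) - 1),
            (1 + 2 * (k : Int)) ^ 2 - 3 * (1 + 2 * (k : Int) - 1)] :: []) =
        rtn ++ [pvGA (1 + 2 * (k : Int))] := by
      intro rtn k; unfold pvGA; split <;> rfl
    simp only [hb]
    have hb2 : ∀ (st : List (List Int) × Int × Int) (k : Nat),
        diaSeqAltRing st (0 + (k : Int)) = diaSeqAltRing st (k : Int) := by
      intro st k; norm_num
    simp only [hb2]
    rw [pvA_eq, pvB_fold]
  · -- size ≤ 0: both ranges are empty
    have h1 : ¬ (1 < size + 1) := by omega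
    rw [PySem.List.pyRange_of_pos 1 (size + 1) (by norm_num), if_neg h1]
    have h2 : PySem.Int.floordiv (size + 1) 2 ≤ 0 := by
      rw [PySem.Int.floordiv_eq_ediv_of_pos (by norm_num)]; omega
    rw [PySem.List.pyRange_one_eq_nil (by omega)]
    rfl
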